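-- pv_equiv track=rewrite | github.com/DeKiYangMao/MetagenoAnalysisForSponges | mass/mass_data_align.py | summary_mass_list
-- ===== SOURCE A (Python) =====
-- def summary_mass_list(data_list, compound_list):
--     # to merge isomers in the database
--     # data_list records all the m/z in the set and compound_list records the compounds id
--     # the m/z and compound_id infomation in these two list should correspond to each other
--     mass_dir = {}
--     for mass in data_list:
--         if mass in mass_dir:
--             compound_id = compound_list[data_list.index(mass)+len(mass_dir[mass])]
--             mass_dir[mass].append(compound_id)
--         else:
--             mass_dir[mass] = []
--             compound_id = compound_list[data_list.index(mass)]
--             mass_dir[mass].append(compound_id)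
--             # The prerequisite for merging isomers and effectively recording compound IDs
--             # is that the data in the sheet has been sorted according to m/z
--             # to ensure that compounds with the same m/z are continuously distributed.
--     return mass_dir
-- ===== SOURCE B (Python) =====
-- def summary_mass_list(data_list, compound_list):
--     # One pass: record each mass's first index and occurrence count
--     # (insertion order = first-appearance order), then emit the groups.
--     first_index = {}
--     count = {}
--     for i, mass in enumerate(data_list):
--         if mass not in first_index:
--             first_index[mass] = i
--             count[mass] = 0
--         count[mass] += 1
--     mass_dir = {}
--     for mass, f in first_index.items():
--         mass_dir[mass] = [compound_list[f + j] for j in range(count[mass])]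
--     return mass_dir
-- ===== Notes on version B (the rewrite author's own statement) =====
-- stated objective: faster
-- what changed: Replaced the per-element data_list.index scan and incremental dict appends by a single enumerate pass that records each mass's first index and count, then a second pass that materialises each group by indexing compound_list at first_index+offset.
import Mathlib
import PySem

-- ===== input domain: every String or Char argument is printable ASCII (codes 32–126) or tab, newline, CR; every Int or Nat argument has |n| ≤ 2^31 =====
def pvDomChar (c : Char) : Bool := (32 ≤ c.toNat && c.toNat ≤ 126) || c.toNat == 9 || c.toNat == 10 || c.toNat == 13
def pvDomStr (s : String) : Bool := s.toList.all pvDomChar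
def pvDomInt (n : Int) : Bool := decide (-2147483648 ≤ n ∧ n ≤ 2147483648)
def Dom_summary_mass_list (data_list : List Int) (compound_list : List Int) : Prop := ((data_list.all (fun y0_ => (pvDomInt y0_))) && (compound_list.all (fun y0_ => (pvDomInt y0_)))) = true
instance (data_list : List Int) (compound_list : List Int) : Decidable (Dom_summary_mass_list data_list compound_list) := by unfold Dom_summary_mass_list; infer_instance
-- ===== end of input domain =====

-- B replaces A's per-element data_list.index scan by one enumerate pass recording each mass's
-- first index and count, then a second pass emitting the groups (measurably faster on large inputs).

-- ===== PORT A =====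
-- one loop iteration of A: dict membership test, data_list.index(mass)(+offset), append
def pvStepA (data_list compound_list : List Int) (d : PySem.Dict Int (List Int)) (mass : Int) : PySem.Dict Int (List Int) :=
  if d.contains mass then
    let compound_id := PySem.List.pyGetD compound_list
      ((((PySem.List.index? data_list mass).getD 0 + (d.getD mass []).length : Nat) : Int)) 0
    d.insert mass (d.getD mass [] ++ [compound_id])
  else
    let d := d.insert mass ([] : List Int)
    let compound_id := PySem.List.pyGetD compound_list
      ((((PySem.List.index? data_list mass).getD 0 : Nat) : Int)) 0
    d.insert mass (d.getD mass [] ++ [compound_id])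

def summary_mass_list (data_list : List Int) (compound_list : List Int) : List (Int × List Int) :=
  (data_list.foldl (pvStepA data_list compound_list) PySem.Dict.empty).items

-- ===== PORT B =====
-- first pass of B: build (first_index, count) over enumerate(data_list)
def pvStepB (st : PySem.Dict Int Int × PySem.Dict Int Int) (p : Int × Int) :
    PySem.Dict Int Int × PySem.Dict Int Int :=
  let st := if st.1.contains p.2 then st else (st.1.insert p.2 p.1, st.2.insert p.2 (0 : Int))
  (st.1, st.2.modify p.2 0 (· + 1))

def summary_mass_list_alt (data_list : List Int) (compound_list : List Int) : List (Int × List Int) :=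
  let st := (PySem.List.enumerate data_list 0).foldl pvStepB (PySem.Dict.empty, PySem.Dict.empty)
  (st.1.items.foldl (fun d q =>
      d.insert q.1 ((PySem.List.pyRange 0 (st.2.getD q.1 0) 1).map
        (fun j => PySem.List.pyGetD compound_list (q.2 + j) 0))) PySem.Dict.empty).items

-- ===== PRECONDITION & SPEC =====
-- Pre_ excludes exactly the inputs on which the Python A raises IndexError (compound_list too
-- short for some mass group: firstIndex(m) + count(m) exceeds len(compound_list)).
def Pre_summary_mass_list (data_list : List Int) (compound_list : List Int) : Prop :=
  ∀ m ∈ data_list, data_list.idxOf m + data_list.count m ≤ compound_list.length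
instance (data_list : List Int) (compound_list : List Int) : Decidable (Pre_summary_mass_list data_list compound_list) := by unfold Pre_summary_mass_list; infer_instance
def pvWitness_summary_mass_list : List Int × List Int := ([1, 1, 2], [10, 11, 12])

def Spec_summary_mass_list (data_list : List Int) (compound_list : List Int) (out : List (Int × List Int)) : Prop := out = summary_mass_list_alt data_list compound_list
instance (data_list : List Int) (compound_list : List Int) (out : List (Int × List Int)) : Decidable (Spec_summary_mass_list data_list compound_list out) := by unfold Spec_summary_mass_list; infer_instance

-- ===== CLAIM (what is proved, stated in full; the proofs are below) =====
def Claim_equal_summary_mass_list : Prop := ∀ (data_list : List Int) (compound_list : List Int), Dom_summary_mass_list data_list compound_list → Pre_summary_mass_list data_list compound_list → Spec_summary_mass_list data_list compound_list (summary_mass_list data_list compound_list)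

-- ===== LEMMAS AND PROOFS =====

-- the value both programs compute: distinct masses in first-appearance order, each mapped to
-- compound_list[firstIdx m + j] for j < count m (both ports read out-of-range cells as the default 0,
-- so the equality below holds without using Pre_; Pre_ is there because the Python A raises outside it)
def pvGrp (data_list compound_list : List Int) (m : Int) (k : Nat) : List Int :=
  (List.range k).map (fun j => compound_list.getD (data_list.idxOf m + j) 0)

def pvCanon (data_list compound_list : List Int) : List (Int × List Int) :=
  (PySem.Set.ofList data_list).map
    (fun m => (m, pvGrp data_list compound_list m (data_list.count m)))

lemma pvIdx_getD (dl : List Int) (m : Int) (h : m ∈ dl) :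
    (PySem.List.index? dl m).getD 0 = dl.idxOf m := by
  rw [PySem.List.index?_eq_idxOf?]
  cases h' : List.idxOf? m dl with
  | none => simp [List.idxOf?_eq_none_iff] at h'; exact absurd h h'
  | some k => simp [List.idxOf_eq_getD_idxOf?, h']

theorem foldA_items (dl cl : List Int) (p : List Int) (hsub : ∀ m ∈ p, m ∈ dl) :
    (p.foldl (pvStepA dl cl) PySem.Dict.empty).items =
      (PySem.Set.ofList p).map (fun m => (m, pvGrp dl cl m (p.count m))) := by
  induction p using List.reverseRecOn with
  | nil => rfl
  | append_singleton p mass ih =>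
    have hsub' : ∀ m ∈ p, m ∈ dl := fun m hm => hsub m (by simp [hm])
    have ih := ih hsub'
    rw [List.foldl_append, List.foldl_cons, List.foldl_nil]
    set d := p.foldl (pvStepA dl cl) PySem.Dict.empty with hd
    have hkeys : d.keys = PySem.Set.ofList p := by
      show d.items.map (·.1) = _
      rw [ih, List.map_map]; exact List.map_id' _
    have hnd : d.keys.Nodup := by rw [hkeys]; exact PySem.Set.nodup_ofList p
    have hcont : d.contains mass = decide (mass ∈ p) := by
      rw [PySem.Dict.contains_eq_decide_mem_keys, hkeys]
      simp [PySem.Set.mem_ofList]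
    by_cases hm : mass ∈ p
    · -- existing key
      have hmem : (mass, pvGrp dl cl mass (p.count mass)) ∈ d.items := by
        rw [ih]; exact List.mem_map.mpr ⟨mass, by simp [PySem.Set.mem_ofList, hm], rfl⟩
      have hget : d.getD mass [] = pvGrp dl cl mass (p.count mass) :=
        PySem.Dict.getD_of_mem_items d hmem hnd []
      have hlen : (d.getD mass []).length = p.count mass := by
        rw [hget]; simp [pvGrp]
      simp only [pvStepA, hcont, hm, decide_true, if_true]
      rw [PySem.Dict.items_insert_of_contains _ _ (by rw [hcont]; simp [hm])]
      rw [ih, List.map_map]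
      rw [PySem.Set.ofList_append_singleton, PySem.Set.add_of_mem (by simp [PySem.Set.mem_ofList, hm])]
      apply List.map_congr_left
      intro m hmS
      by_cases hmm : m = mass
      · subst hmm
        simp only [Function.comp_apply, beq_self_eq_true, if_true]
        have hc1 : List.count m (p ++ [m]) = List.count m p + 1 := by simp
        rw [hc1, pvIdx_getD dl m (hsub m (by simp)), hget]
        have hl : (pvGrp dl cl m (List.count m p)).length = List.count m p := by simp [pvGrp]
        rw [hl]
        simp only [pvGrp, List.range_succ, List.map_append, List.map_cons, List.map_nil,
          Prod.mk.injEq, true_and, List.append_cancel_left_eq, List.cons.injEq, and_true]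
        rw [PySem.List.pyGetD_natCast]
      · simp only [Function.comp_apply]
        rw [if_neg (by simp [hmm])]
        have h0 : List.count m [mass] = 0 := by
          simp [List.count_singleton]; exact fun h => hmm h.symm
        simp [List.count_append, h0]
    · -- fresh key
      have hc : d.contains mass = false := by rw [hcont]; simp [hm]
      simp only [pvStepA, hc, Bool.false_eq_true, if_false]
      rw [PySem.Dict.getD_insert_self, PySem.Dict.insert_insert_self]
      rw [PySem.Dict.items_insert_of_not_contains _ _ hc, ih]
      rw [PySem.Set.ofList_append_singleton, PySem.Set.add_of_not_mem (by simp [PySem.Set.mem_ofList, hm])]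
      rw [List.map_append]
      congr 1
      · apply List.map_congr_left
        intro m hmS
        have hmp : m ∈ p := by simpa [PySem.Set.mem_ofList] using hmS
        have h0 : List.count m [mass] = 0 := by
          simp [List.count_singleton]; exact fun h => hm (h ▸ hmp)
        simp [List.count_append, h0]
      · rw [pvIdx_getD dl mass (hsub mass (by simp))]
        simp [List.count_append, List.count_eq_zero_of_not_mem hm, pvGrp]

theorem foldB_inv (p : List Int) :
    ((PySem.List.enumerate p 0).foldl pvStepB (PySem.Dict.empty, PySem.Dict.empty)).1.items =
        (PySem.Set.ofList p).map (fun m => (m, (p.idxOf m : Int))) ∧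
      ∀ m, ((PySem.List.enumerate p 0).foldl pvStepB (PySem.Dict.empty, PySem.Dict.empty)).2.getD m 0 =
        (p.count m : Int) := by
  induction p using List.reverseRecOn with
  | nil => exact ⟨rfl, fun m => by simp [PySem.List.enumerate, PySem.Dict.getD_empty]⟩
  | append_singleton p mass ih =>
    obtain ⟨ih1, ih2⟩ := ih
    rw [PySem.List.enumerate_append]
    have henum1 : PySem.List.enumerate [mass] (0 + (p.length : Int)) = [((p.length : Int), mass)] := by
      simp [PySem.List.enumerate_cons, PySem.List.enumerate_nil]
    rw [henum1, List.foldl_append, List.foldl_cons, List.foldl_nil]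
    set st := (PySem.List.enumerate p 0).foldl pvStepB (PySem.Dict.empty, PySem.Dict.empty) with hst
    clear_value st
    have hkeys : st.1.keys = PySem.Set.ofList p := by
      show st.1.items.map (·.1) = _
      rw [ih1, List.map_map]; exact List.map_id' _
    have hcont : st.1.contains mass = decide (mass ∈ p) := by
      rw [PySem.Dict.contains_eq_decide_mem_keys, hkeys]
      simp [PySem.Set.mem_ofList]
    by_cases hm : mass ∈ p
    · constructor
      · simp only [pvStepB, hcont, hm, decide_true, if_true]
        rw [ih1]
        rw [PySem.Set.ofList_append_singleton, PySem.Set.add_of_mem (by simp [PySem.Set.mem_ofList, hm])]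
        apply List.map_congr_left
        intro m hmS
        rw [List.idxOf_append_of_mem (by simpa [PySem.Set.mem_ofList] using hmS)]
      · intro m
        simp only [pvStepB, hcont, hm, decide_true, if_true]
        rw [PySem.Dict.getD_modify, ih2, ih2]
        by_cases hmm : m = mass
        · subst hmm; simp [List.count_append]
        · have h0 : List.count m [mass] = 0 := by
            simp [List.count_singleton]; exact fun h => hmm h.symm
          simp [hmm, List.count_append, h0]
    · have hc : st.1.contains mass = false := by rw [hcont]; simp [hm]
      constructor
      · simp only [pvStepB, hc, Bool.false_eq_true, if_false]
        rw [PySem.Dict.items_insert_of_not_contains _ _ hc, ih1]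
        rw [PySem.Set.ofList_append_singleton, PySem.Set.add_of_not_mem (by simp [PySem.Set.mem_ofList, hm])]
        rw [List.map_append]
        congr 1
        · apply List.map_congr_left
          intro m hmS
          rw [List.idxOf_append_of_mem (by simpa [PySem.Set.mem_ofList] using hmS)]
        · simp [List.idxOf_append_of_notMem hm]
      · intro m
        simp only [pvStepB, hc, Bool.false_eq_true, if_false]
        rw [PySem.Dict.getD_modify]
        by_cases hmm : m = mass
        · subst hmm
          rw [PySem.Dict.getD_insert_self]
          have h0 : List.count m p = 0 := List.count_eq_zero_of_not_mem hm
          simp [List.count_append, h0]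
        · rw [if_neg hmm, PySem.Dict.getD_insert _ _ _ _ _, if_neg hmm, ih2]
          have h0 : List.count m [mass] = 0 := by
            simp [List.count_singleton]; exact fun h => hmm h.symm
          simp [List.count_append, h0]

theorem A_eq_canon (dl cl : List Int) : summary_mass_list dl cl = pvCanon dl cl :=
  foldA_items dl cl dl (fun _ hm => hm)

theorem B_eq_canon (dl cl : List Int) : summary_mass_list_alt dl cl = pvCanon dl cl := by
  obtain ⟨ih1, ih2⟩ := foldB_inv dl
  show ((((PySem.List.enumerate dl 0).foldl pvStepB (PySem.Dict.empty, PySem.Dict.empty)).1.items).foldl _ PySem.Dict.empty).items = _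
  set st := (PySem.List.enumerate dl 0).foldl pvStepB (PySem.Dict.empty, PySem.Dict.empty) with hst
  clear_value st
  have hnd : (st.1.items.map (·.1)).Nodup := by
    rw [ih1, List.map_map]
    rw [show ((·.1) ∘ fun m => (m, (dl.idxOf m : Int))) = fun m => m from rfl, List.map_id' _]
    exact PySem.Set.nodup_ofList dl
  rw [PySem.Dict.items_foldl_insert_fresh st.1.items (·.1)
        (fun q => (PySem.List.pyRange 0 (st.2.getD q.1 0) 1).map
          (fun j => PySem.List.pyGetD cl (q.2 + j) 0))
        PySem.Dict.empty (by intro a _; simp) hnd]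
  rw [ih1, List.map_map]
  rw [show PySem.Dict.empty.items = ([] : List (Int × List Int)) from rfl, List.nil_append]
  unfold pvCanon
  apply List.map_congr_left
  intro m hmS
  simp only [Function.comp_apply]
  rw [ih2 m, PySem.List.pyRange_zero_natCast, List.map_map]
  congr 1
  unfold pvGrp
  apply List.map_congr_left
  intro k hk
  simp only [Function.comp_apply]
  rw [← Nat.cast_add, PySem.List.pyGetD_natCast]

-- ===== VERDICT (by name: the statement is the Claim_ definition above) =====
theorem summary_mass_list_spec : Claim_equal_summary_mass_list := by
  intro dl cl _ _
  unfold Spec_summary_mass_list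
  rw [A_eq_canon, B_eq_canon]
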